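-- pv_equiv track=rewrite | github.com/bugusun/bugusunccb | game/map_system.py | _distance_map
-- ===== SOURCE A (Python) =====
-- GridPos = tuple[int, int]
--
-- def _distance_map(main_path: list[GridPos], branches: dict[GridPos, str]) -> dict[GridPos, int]:
--     distances = {coord: idx for idx, coord in enumerate(main_path)}
--     for coord, room_type in branches.items():
--         for base_idx, base in enumerate(main_path[1:-1], 1):
--             if abs(coord[0] - base[0]) + abs(coord[1] - base[1]) == 1:
--                 distances[coord] = base_idx + (1 if room_type in {"treasure", "combat"} else 0)
--                 break
--     return distances
-- ===== SOURCE B (Python) =====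
-- def _distance_map(main_path, branches):
--     distances = {coord: idx for idx, coord in enumerate(main_path)}
--     nearest = {}
--     for idx, (x, y) in enumerate(main_path[1:-1], 1):
--         for p in ((x + 1, y), (x - 1, y), (x, y + 1), (x, y - 1)):
--             if p in branches and p not in nearest:
--                 nearest[p] = idx
--     for coord, room_type in branches.items():
--         if coord in nearest:
--             distances[coord] = nearest[coord] + (1 if room_type in ("treasure", "combat") else 0)
--     return distances
-- ===== Notes on version B (the rewrite author's own statement) =====
-- stated objective: faster
-- what changed: Instead of scanning the whole main path once per branch room, B makes a single pass over the inner path cells, radiating to each cell's four neighbors to record in a dict the first (smallest) adjacent path index per branch coordinate, then merges those values in branches order.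
import Mathlib
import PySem

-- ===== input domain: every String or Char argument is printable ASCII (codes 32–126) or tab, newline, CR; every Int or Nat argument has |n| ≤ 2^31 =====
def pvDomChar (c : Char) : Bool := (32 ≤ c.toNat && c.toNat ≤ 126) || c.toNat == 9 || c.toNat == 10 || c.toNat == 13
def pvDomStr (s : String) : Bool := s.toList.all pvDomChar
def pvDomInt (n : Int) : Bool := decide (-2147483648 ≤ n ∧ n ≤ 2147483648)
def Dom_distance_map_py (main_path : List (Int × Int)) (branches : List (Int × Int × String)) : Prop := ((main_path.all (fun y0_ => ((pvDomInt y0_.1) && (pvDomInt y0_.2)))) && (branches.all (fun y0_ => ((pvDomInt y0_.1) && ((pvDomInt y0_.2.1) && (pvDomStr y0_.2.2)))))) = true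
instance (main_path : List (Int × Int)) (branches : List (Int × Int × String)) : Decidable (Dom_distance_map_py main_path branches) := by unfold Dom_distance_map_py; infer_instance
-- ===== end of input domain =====

-- B replaces the per-branch scan of the main path by one pass over the inner path cells
-- that records each branch's nearest path index via its four neighbors (faster).


-- ===== PORT A =====
-- inner 'for base_idx, base in enumerate(main_path[1:-1], 1): … break'
def pvALoop (coord : Int × Int) (room_type : String) (inner : List (Int × (Int × Int))) (d : PySem.Dict (Int × Int) Int) : PySem.Dict (Int × Int) Int :=
  match inner with
  | [] => d
  | (i, base) :: rest =>
    if (coord.1 - base.1).natAbs + (coord.2 - base.2).natAbs == 1 then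
      d.insert coord (i + (if room_type == "treasure" || room_type == "combat" then 1 else 0))
    else pvALoop coord room_type rest d

def distance_map_py (main_path : List (Int × Int)) (branches : List (Int × Int × String)) : List (Int × Int × Int) :=
  let distances : PySem.Dict (Int × Int) Int :=
    (PySem.List.enumerate main_path 0).foldl (fun d p => d.insert p.2 p.1) PySem.Dict.empty
  let distances :=
    branches.foldl (fun d b =>
      pvALoop (b.1, b.2.1) b.2.2 (PySem.List.enumerate (PySem.List.slice main_path (some 1) (some (-1))) 1) d) distances
  distances.items.map (fun p => (p.1.1, p.1.2, p.2))

-- ===== PORT B =====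
-- the four orthogonal neighbors of (x, y)
def pvNb (x y : Int) : List (Int × Int) := [(x + 1, y), (x - 1, y), (x, y + 1), (x, y - 1)]

def distance_map_py_alt (main_path : List (Int × Int)) (branches : List (Int × Int × String)) : List (Int × Int × Int) :=
  let distances : PySem.Dict (Int × Int) Int :=
    (PySem.List.enumerate main_path 0).foldl (fun d p => d.insert p.2 p.1) PySem.Dict.empty
  let nearest : PySem.Dict (Int × Int) Int :=
    (PySem.List.enumerate (PySem.List.slice main_path (some 1) (some (-1))) 1).foldl
      (fun n ib =>
        (pvNb ib.2.1 ib.2.2).foldl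
          (fun n p => if branches.any (fun b => (b.1, b.2.1) == p) && !(n.contains p) then n.insert p ib.1 else n) n)
      PySem.Dict.empty
  let distances :=
    branches.foldl (fun d b =>
      if nearest.contains (b.1, b.2.1) then
        d.insert (b.1, b.2.1) (nearest.getD (b.1, b.2.1) 0 + (if b.2.2 == "treasure" || b.2.2 == "combat" then 1 else 0))
      else d) distances
  distances.items.map (fun p => (p.1.1, p.1.2, p.2))

-- ===== PRECONDITION & SPEC =====
def Spec_distance_map_py (main_path : List (Int × Int)) (branches : List (Int × Int × String)) (out : List (Int × Int × Int)) : Prop := out = distance_map_py_alt main_path branches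
instance (main_path : List (Int × Int)) (branches : List (Int × Int × String)) (out : List (Int × Int × Int)) : Decidable (Spec_distance_map_py main_path branches out) := by unfold Spec_distance_map_py; infer_instance

-- ===== CLAIM (what is proved, stated in full; the proofs are below) =====
def Claim_equal_distance_map_py : Prop := ∀ (main_path : List (Int × Int)) (branches : List (Int × Int × String)), Dom_distance_map_py main_path branches → Spec_distance_map_py main_path branches (distance_map_py main_path branches)

-- ===== LEMMAS AND PROOFS =====

-- first inner path index adjacent to coord (the value A's break finds and B's nearest stores)
def pvFirstAdj (coord : Int × Int) : List (Int × (Int × Int)) → Option Int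
  | [] => none
  | (i, base) :: rest =>
    if (coord.1 - base.1).natAbs + (coord.2 - base.2).natAbs == 1 then some i
    else pvFirstAdj coord rest

theorem pvALoop_eq (coord : Int × Int) (rt : String) (inner : List (Int × (Int × Int)))
    (d : PySem.Dict (Int × Int) Int) :
    pvALoop coord rt inner d =
      match pvFirstAdj coord inner with
      | none => d
      | some i => d.insert coord (i + (if rt == "treasure" || rt == "combat" then 1 else 0)) := by
  induction inner with
  | nil => rfl
  | cons hd tl ih =>
    obtain ⟨i, base⟩ := hd
    simp only [pvALoop, pvFirstAdj]
    split <;> simp [ih]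

-- membership in the four-neighbor list is exactly Manhattan distance 1
theorem pvMem_nb (q : Int × Int) (x y : Int) :
    (q ∈ pvNb x y) ↔ ((q.1 - x).natAbs + (q.2 - y).natAbs == 1) = true := by
  obtain ⟨a, b⟩ := q
  simp only [pvNb, List.mem_cons, List.not_mem_nil, or_false, Prod.mk.injEq, beq_iff_eq]
  omega

-- one path cell: the fold over an arbitrary neighbor list sets q to i iff q is a
-- new branch neighbor
theorem pvNbFold_get? (branches : List (Int × Int × String)) (i : Int)
    (ps : List (Int × Int)) (n : PySem.Dict (Int × Int) Int) (q : Int × Int) :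
    (ps.foldl (fun n p => if branches.any (fun b => (b.1, b.2.1) == p) && !(n.contains p) then n.insert p i else n) n).get? q =
      match n.get? q with
      | some v => some v
      | none => if branches.any (fun b => (b.1, b.2.1) == q) && q ∈ ps then some i else none := by
  induction ps generalizing n with
  | nil => cases h : n.get? q <;> simp [h]
  | cons p ps ih =>
    simp only [List.foldl_cons, ih]
    by_cases hpq : q = p
    · subst hpq
      by_cases hb : branches.any (fun b => (b.1, b.2.1) == q) = true
      · rw [PySem.Dict.contains_eq_isSome_get?]
        cases h : n.get? q with
        | some v => simp [h, hb]
        | none => simp [hb, PySem.Dict.get?_insert_self]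
      · simp only [Bool.not_eq_true] at hb
        simp [hb]
    · have hstep : (if (branches.any (fun b => (b.1, b.2.1) == p) && !(n.contains p)) = true then n.insert p i else n).get? q = n.get? q := by
        split
        · exact PySem.Dict.get?_insert_of_ne n i hpq
        · rfl
      rw [hstep]
      cases hn : n.get? q with
      | some v => simp
      | none =>
        have hdec : decide (q ∈ p :: ps) = decide (q ∈ ps) := by simp [hpq]
        rw [hdec]

-- the whole nearest-building pass computes pvFirstAdj for every branch coordinate
theorem pvNearest_get? (branches : List (Int × Int × String))
    (inner : List (Int × (Int × Int))) (n : PySem.Dict (Int × Int) Int) (q : Int × Int) :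
    (inner.foldl
      (fun n ib =>
        (pvNb ib.2.1 ib.2.2).foldl
          (fun n p => if branches.any (fun b => (b.1, b.2.1) == p) && !(n.contains p) then n.insert p ib.1 else n) n)
      n).get? q =
      match n.get? q with
      | some v => some v
      | none => if branches.any (fun b => (b.1, b.2.1) == q) then pvFirstAdj q inner else none := by
  induction inner generalizing n with
  | nil => cases h : n.get? q <;> simp [h, pvFirstAdj]
  | cons ib rest ih =>
    obtain ⟨i, x, y⟩ := ib
    simp only [List.foldl_cons, ih, pvNbFold_get?, pvFirstAdj]
    by_cases hb : branches.any (fun b => (b.1, b.2.1) == q) = true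
    · cases hn : n.get? q with
      | some v => simp
      | none =>
        simp only [hb, Bool.true_and]
        by_cases hmem : q ∈ pvNb x y
        · have := (pvMem_nb q x y).mp hmem
          simp [hmem, this]
        · have : ((q.1 - x).natAbs + (q.2 - y).natAbs == 1) = false := by
            rw [← Bool.not_eq_true]; intro h; exact hmem ((pvMem_nb q x y).mpr h)
          simp [hmem, this]
    · simp only [Bool.not_eq_true] at hb
      cases hn : n.get? q <;> simp [hb]

-- ===== VERDICT (by name: the statement is the Claim_ definition above) =====
theorem distance_map_py_spec : Claim_equal_distance_map_py := by
  intro main_path branches _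
  unfold Spec_distance_map_py distance_map_py distance_map_py_alt
  dsimp only
  congr 1
  congr 1
  apply PySem.List.foldl_congr_mem'
  intro b hb d
  obtain ⟨cx, cy, rt⟩ := b
  rw [pvALoop_eq]
  have hbany : branches.any (fun b => (b.1, b.2.1) == (cx, cy)) = true := by
    simp only [List.any_eq_true]
    exact ⟨(cx, cy, rt), hb, by simp⟩
  have hget := pvNearest_get? branches
    (PySem.List.enumerate (PySem.List.slice main_path (some 1) (some (-1))) 1)
    PySem.Dict.empty (cx, cy)
  rw [PySem.Dict.get?_empty] at hget
  simp only [hbany] at hget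
  rw [PySem.Dict.contains_eq_isSome_get?, hget, PySem.Dict.getD_eq_get?_getD, hget]
  cases h : pvFirstAdj (cx, cy) (PySem.List.enumerate (PySem.List.slice main_path (some 1) (some (-1))) 1) with
  | none => simp
  | some i => simp
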